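-- pv_equiv track=rewrite | github.com/asadsk8r02/Remo.care- | Part1/minmax.py | check_zero
-- ===== SOURCE A (Python) =====
-- def check_zero(array):
--     '''
--     The funtion helps to validate the case of continuous Zeros.
--
--     '''
--
--     hr = list(array)
--     if hr.count(0) >=2 and hr.count(0) <9:
--         ind = [i for i, element in enumerate(hr) if element!=0]
--         if ind[-1]-ind[-2] >= 2 :
--             return True
--         else:
--             return False
--     elif hr.count(0) ==9:
--         return True
--
--     else:
--         return False
-- ===== SOURCE B (Python) =====
-- def check_zero(array):
--     # Different algorithm: instead of building the list of nonzero indices and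
--     # subtracting the last two, strip trailing zeros from a copy, drop the last
--     # (nonzero) element, and test whether the element now at the end is a zero.
--     t = list(array)
--     zeros = t.count(0)
--     if 2 <= zeros < 9:
--         while t[-1] == 0:
--             t.pop()
--         t.pop()
--         return t[-1] == 0
--     return zeros == 9
-- ===== Notes on version B (the rewrite author's own statement) =====
-- stated objective: alternative
-- what changed: Instead of building the list of all nonzero indices and subtracting the last two, B strips trailing zeros from a copy with a pop loop, pops the last (nonzero) element, and tests whether the element now at the end is a zero.
import Mathlib
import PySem

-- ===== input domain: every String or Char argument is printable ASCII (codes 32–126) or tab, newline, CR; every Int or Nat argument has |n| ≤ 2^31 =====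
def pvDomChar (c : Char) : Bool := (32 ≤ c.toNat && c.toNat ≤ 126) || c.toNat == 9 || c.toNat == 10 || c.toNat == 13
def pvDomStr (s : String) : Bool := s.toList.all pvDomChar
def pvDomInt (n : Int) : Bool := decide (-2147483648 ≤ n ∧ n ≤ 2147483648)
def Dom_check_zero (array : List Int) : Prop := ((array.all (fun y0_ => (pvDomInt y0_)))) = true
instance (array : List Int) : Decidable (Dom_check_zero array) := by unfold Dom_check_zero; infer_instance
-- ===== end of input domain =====

-- B strips trailing zeros, pops the last nonzero, and tests the new last element for zero,
-- instead of A's nonzero-index list and last-two-index subtraction; objective: alternative.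


-- ===== PORT A =====
-- hr.count(0) is recomputed at each of its three uses, as in A.
def check_zero (array : List Int) : Bool :=
  let hr := array
  if 2 ≤ PySem.List.count hr 0 ∧ PySem.List.count hr 0 < 9 then
    let ind := ((PySem.List.enumerate hr).filter (fun p => p.2 != 0)).map (fun p => p.1)
    match PySem.List.pyGet? ind (-1), PySem.List.pyGet? ind (-2) with
    | some a, some b => decide (a - b ≥ 2)
    | _, _ => false   -- IndexError in Python; excluded by Pre_check_zero
  else if PySem.List.count hr 0 = 9 then true else false

-- ===== PORT B =====
-- 'while t[-1] == 0: t.pop()' — the guard's t[-1] on an empty list is an IndexError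
-- in Python; that only happens outside Pre_check_zero (the returned l is irrelevant there).
def stripTrail (l : List Int) : List Int :=
  match h : PySem.List.pyGet? l (-1) with
  | some v => if v == 0 then stripTrail l.dropLast else l
  | none => l
termination_by l.length
decreasing_by
  have hne : l ≠ [] := by
    intro he; subst he; simp [PySem.List.pyGet?_neg_one] at h
  have : 0 < l.length := List.length_pos_iff.mpr hne
  simp [List.length_dropLast]; omega

def check_zero_alt (array : List Int) : Bool :=
  let t := array
  let zeros := PySem.List.count t 0
  if 2 ≤ zeros ∧ zeros < 9 then
    let s := (stripTrail t).dropLast   -- t.pop(); pop of an empty list raises: outside Pre_check_zero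
    match PySem.List.pyGet? s (-1) with
    | some v => v == 0
    | none => false   -- IndexError in Python; excluded by Pre_check_zero
  else zeros == 9

-- ===== PRECONDITION & SPEC =====
-- Pre_ excludes exactly the inputs where Python A raises IndexError (zero count in [2,9)
-- but fewer than two nonzero elements); Python B raises IndexError on part of that region too.
def Pre_check_zero (array : List Int) : Prop :=
  (2 ≤ array.count 0 ∧ array.count 0 < 9) → 2 ≤ (array.filter (fun x => x != 0)).length
instance (array : List Int) : Decidable (Pre_check_zero array) := by unfold Pre_check_zero; infer_instance
def pvWitness_check_zero : List Int := [0, 0, 1, 2]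
def Spec_check_zero (array : List Int) (out : Bool) : Prop := out = check_zero_alt array
instance (array : List Int) (out : Bool) : Decidable (Spec_check_zero array out) := by unfold Spec_check_zero; infer_instance

-- ===== CLAIM (what is proved, stated in full; the proofs are below) =====
def Claim_equal_check_zero : Prop := ∀ (array : List Int), Dom_check_zero array → Pre_check_zero array → Spec_check_zero array (check_zero array)

-- ===== LEMMAS AND PROOFS =====

-- A's nonzero-index list, named for the proofs.
def pvInd (l : List Int) : List Int :=
  ((PySem.List.enumerate l).filter (fun p => p.2 != 0)).map (fun p => p.1)

theorem pvInd_append (xs : List Int) (x : Int) :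
    pvInd (xs ++ [x]) =
      if x = 0 then pvInd xs else pvInd xs ++ [(xs.length : Int)] := by
  unfold pvInd
  rw [PySem.List.enumerate_append]
  simp [PySem.List.enumerate_cons, PySem.List.enumerate_nil, List.filter_append]
  by_cases hx : x = 0 <;> simp [hx]

theorem stripTrail_append_zero (xs : List Int) :
    stripTrail (xs ++ [(0 : Int)]) = stripTrail xs := by
  rw [stripTrail]
  split
  · rename_i v h
    rw [PySem.List.pyGet?_neg_one_append_singleton] at h
    cases h
    simp
  · rename_i h
    rw [PySem.List.pyGet?_neg_one_append_singleton] at h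
    cases h

theorem stripTrail_append_nonzero (xs : List Int) (x : Int) (hx : x ≠ 0) :
    stripTrail (xs ++ [x]) = xs ++ [x] := by
  rw [stripTrail]
  split
  · rename_i v h
    rw [PySem.List.pyGet?_neg_one_append_singleton] at h
    cases h
    simp [hx]
  · rename_i h
    rw [PySem.List.pyGet?_neg_one_append_singleton] at h

-- last two elements of ys ++ [a, b]
theorem pv_pyGet_neg_two (ys : List Int) (a b : Int) :
    PySem.List.pyGet? (ys ++ [a] ++ [b]) (-2) = some a := by
  rw [List.append_assoc]
  rw [PySem.List.pyGet?_neg_ofNat _ 2 (by omega) (by simp)]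
  simp

-- Structure of a list with at least one nonzero: the last nonzero splits it, the strip
-- keeps everything up to it, and it is the last entry of A's index list.
theorem pv_lnz (xs : List Int) (h : ∃ y ∈ xs, y ≠ 0) :
    ∃ u v w, xs = u ++ v :: w ∧ v ≠ 0 ∧ (∀ z ∈ w, z = 0) ∧
      stripTrail xs = u ++ [v] ∧ pvInd xs = pvInd u ++ [(u.length : Int)] := by
  induction xs using List.reverseRecOn with
  | nil => simp at h
  | append_singleton xs x ih =>
    by_cases hx : x = 0
    · subst hx
      obtain ⟨y, hy, hy0⟩ := h
      rcases List.mem_append.mp hy with hy' | hy'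
      · obtain ⟨u, v, w, h1, h2, h3, h4, h5⟩ := ih ⟨y, hy', hy0⟩
        refine ⟨u, v, w ++ [0], by rw [h1]; simp, h2, ?_, ?_, ?_⟩
        · intro z hz; rcases List.mem_append.mp hz with hz | hz
          · exact h3 z hz
          · simpa using hz
        · rw [stripTrail_append_zero, h4]
        · rw [pvInd_append]; simp [h5]
      · simp at hy'; exact absurd hy' hy0
    · exact ⟨xs, x, [], rfl, hx, by simp, stripTrail_append_nonzero xs x hx,
        by rw [pvInd_append]; simp [hx]⟩

theorem check_zero_spec : Claim_equal_check_zero := by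
  intro l _ hpre
  unfold Spec_check_zero check_zero check_zero_alt
  by_cases hc : 2 ≤ PySem.List.count l 0 ∧ PySem.List.count l 0 < 9
  · rw [if_pos hc, if_pos hc]
    have hcnt : PySem.List.count l 0 = l.count 0 := PySem.List.count_eq l 0
    have hfl : 2 ≤ (l.filter (fun x => x != 0)).length := hpre (by rw [← hcnt]; exact hc)
    -- l has a nonzero element
    have hl : ∃ y ∈ l, y ≠ 0 := by
      rcases List.exists_mem_of_length_pos (l := l.filter (fun x => x != 0)) (by omega) with ⟨y, hy⟩
      have := List.of_mem_filter hy
      exact ⟨y, List.mem_of_mem_filter hy, by simpa using this⟩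
    obtain ⟨u, v, w, hsplit, hv, hw, hstrip, hind⟩ := pv_lnz l hl
    -- u too has a nonzero element
    have hfilw : w.filter (fun x => x != 0) = [] := by
      apply List.filter_eq_nil_iff.mpr
      intro z hz; simpa using hw z hz
    have hfil : l.filter (fun x => x != 0) = u.filter (fun x => x != 0) ++ [v] := by
      rw [hsplit]; simp [List.filter_append, hfilw, hv]
    have hu : ∃ y ∈ u, y ≠ 0 := by
      have : 1 ≤ (u.filter (fun x => x != 0)).length := by
        have := hfl; rw [hfil] at this; simp at this; omega
      rcases List.exists_mem_of_length_pos (l := u.filter (fun x => x != 0)) (by omega) with ⟨y, hy⟩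
      have := List.of_mem_filter hy
      exact ⟨y, List.mem_of_mem_filter hy, by simpa using this⟩
    obtain ⟨u', v', w', hsplit', hv', hw', hstrip', hind'⟩ := pv_lnz u hu
    -- A's two index lookups
    have hA1 : PySem.List.pyGet? (pvInd l) (-1) = some (u.length : Int) := by
      rw [hind]; exact PySem.List.pyGet?_neg_one_append_singleton _ _
    have hA2 : PySem.List.pyGet? (pvInd l) (-2) = some (u'.length : Int) := by
      rw [hind, hind']; exact pv_pyGet_neg_two _ _ _
    have hulen : u.length = u'.length + w'.length + 1 := by
      rw [hsplit']; simp; omega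
    -- B's lookup
    have hB0 : (stripTrail l).dropLast = u := by rw [hstrip]; simp
    show (match PySem.List.pyGet? (pvInd l) (-1), PySem.List.pyGet? (pvInd l) (-2) with
          | some a, some b => decide (a - b ≥ 2)
          | _, _ => false)
        = (match PySem.List.pyGet? ((stripTrail l).dropLast) (-1) with
           | some v => v == 0
           | none => false)
    rw [hA1, hA2, hB0]
    show (decide ((u.length : Int) - (u'.length : Int) ≥ 2))
        = (match PySem.List.pyGet? u (-1) with
           | some v => v == 0
           | none => false)
    rcases List.eq_nil_or_concat w' with hwnil | ⟨ws, z, hwz⟩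
    · subst hwnil
      have : PySem.List.pyGet? u (-1) = some v' := by
        rw [PySem.List.pyGet?_neg_one, hsplit']; simp
      rw [this]
      simp only [hulen]
      simp [hv']
    · rw [List.concat_eq_append] at hwz
      have hz : z = 0 := hw' z (by rw [hwz]; simp)
      have : PySem.List.pyGet? u (-1) = some 0 := by
        rw [PySem.List.pyGet?_neg_one, hsplit', hwz, hz]
        simp only [List.getLast?_append]
        have h : v' :: (ws ++ [(0:Int)]) = (v' :: ws) ++ [0] := by simp
        rw [h, List.getLast?_append]
        simp
      rw [this]
      have : (2:Int) ≤ (u.length : Int) - (u'.length : Int) := by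
        rw [hwz] at hulen; simp at hulen; omega
      simp [this]
  · rw [if_neg hc, if_neg hc]
    by_cases h9 : PySem.List.count l 0 = 9 <;>
      simp [PySem.List.count_eq] at h9 ⊢ <;> simp [h9]

-- ===== VERDICT (by name: the statement is the Claim_ definition above) =====
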